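-- pv_equiv track=rewrite | github.com/engineer1469/AOC | 2025/4/solution.py | count_surrounding_rolls
-- ===== SOURCE A (Python) =====
-- def count_surrounding_rolls(data, x, y, h, w):
--     cnt = 0
--     for dy in (-1, 0, 1):
--         for dx in (-1, 0, 1):
--             if dx == 0 and dy == 0:
--                 continue  # skip center
--
--             nx = x + dx
--             ny = y + dy
--
--             if 0 <= nx < w and 0 <= ny < h:
--                 if data[ny][nx]:
--                     cnt += 1
--     return cnt
-- ===== SOURCE B (Python) =====
-- def count_surrounding_rolls(data, x, y, h, w):
--     total = 0
--     x1 = max(0, x - 1)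
--     x2 = max(0, min(w, x + 2))
--     for ny in range(max(0, y - 1), min(h, y + 2)):
--         total += sum(1 for v in data[ny][x1:x2] if v)
--     if 0 <= y < h and 0 <= x < w and data[y][x]:
--         total -= 1
--     return total
-- ===== Notes on version B (the rewrite author's own statement) =====
-- stated objective: simpler
-- what changed: Replaces the 3x3 offset double loop with per-cell bounds checks by a loop over the clamped row range that counts truthy cells in a clamped row slice, then subtracts the centre cell once at the end.
-- outside the precondition, e.g. on count_surrounding_rolls([[1]], 5, 0, 2, 1): A returns 0, B raises IndexError; on count_surrounding_rolls([[1]], 1, 0, 1, 2): A returns 1, B raises IndexError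
import Mathlib
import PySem

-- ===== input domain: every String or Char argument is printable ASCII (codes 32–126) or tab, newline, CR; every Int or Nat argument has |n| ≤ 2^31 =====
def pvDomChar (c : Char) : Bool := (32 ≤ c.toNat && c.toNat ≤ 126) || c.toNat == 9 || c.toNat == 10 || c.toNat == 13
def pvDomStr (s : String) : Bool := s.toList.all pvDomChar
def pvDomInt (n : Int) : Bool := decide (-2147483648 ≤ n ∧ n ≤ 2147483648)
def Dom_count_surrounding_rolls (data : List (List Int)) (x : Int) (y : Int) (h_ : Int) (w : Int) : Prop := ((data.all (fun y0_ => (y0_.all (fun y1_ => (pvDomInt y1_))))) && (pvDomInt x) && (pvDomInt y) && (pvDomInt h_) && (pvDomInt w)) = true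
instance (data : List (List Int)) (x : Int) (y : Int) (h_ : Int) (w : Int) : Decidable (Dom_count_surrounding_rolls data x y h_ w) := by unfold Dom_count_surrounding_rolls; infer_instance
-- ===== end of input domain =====

-- B counts truthy cells in clamped row slices and subtracts the centre once, instead of A's 3x3 offset loop with per-cell bounds checks (objective: simpler); Pre_ excludes inputs where A or B would raise IndexError on a grid smaller than the stated h/w.


-- ===== PORT A =====
def count_surrounding_rolls (data : List (List Int)) (x : Int) (y : Int) (h_ : Int) (w : Int) : Int :=
  List.foldl (fun cnt dy =>
    List.foldl (fun cnt dx =>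
      if dx = 0 ∧ dy = 0 then cnt
      else
        if 0 ≤ x + dx ∧ x + dx < w ∧ 0 ≤ y + dy ∧ y + dy < h_ then
          if (PySem.List.pyGet? ((PySem.List.pyGet? data (y + dy)).getD []) (x + dx)).getD 0 ≠ 0 then cnt + 1 else cnt
        else cnt) cnt [-1, 0, 1]) 0 [-1, 0, 1]

-- ===== PORT B =====
def count_surrounding_rolls_alt (data : List (List Int)) (x : Int) (y : Int) (h_ : Int) (w : Int) : Int :=
  let x1 := max 0 (x - 1)
  let x2 := max 0 (min w (x + 2))
  let total := List.foldl (fun total ny =>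
      total + ((PySem.List.slice ((PySem.List.pyGet? data ny).getD []) (some x1) (some x2)).countP (fun v => v ≠ 0) : Int))
    0 (PySem.List.pyRange (max 0 (y - 1)) (min h_ (y + 2)) 1)
  if 0 ≤ y ∧ y < h_ ∧ 0 ≤ x ∧ x < w ∧ (PySem.List.pyGet? ((PySem.List.pyGet? data y).getD []) x).getD 0 ≠ 0 then total - 1 else total

-- ===== PRECONDITION & SPEC =====
-- Pre_ excludes exactly the inputs on which h_/w overstate the grid's real size near (x, y): there A raises IndexError,
-- or A happens to return while B's row access/centre access raises IndexError (see cites).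
def Pre_count_surrounding_rolls (data : List (List Int)) (x : Int) (y : Int) (h_ : Int) (w : Int) : Prop :=
  ∀ ny ∈ [y - 1, y, y + 1], 0 ≤ ny → ny < h_ →
    ny.toNat < data.length ∧
    ∀ nx ∈ [x - 1, x, x + 1], 0 ≤ nx → nx < w → nx.toNat < (data.getD ny.toNat []).length
instance (data : List (List Int)) (x : Int) (y : Int) (h_ : Int) (w : Int) : Decidable (Pre_count_surrounding_rolls data x y h_ w) := by unfold Pre_count_surrounding_rolls; infer_instance

def pvWitness_count_surrounding_rolls : List (List Int) × Int × Int × Int × Int := ([[1, 0], [0, 1]], 0, 0, 2, 2)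

def Spec_count_surrounding_rolls (data : List (List Int)) (x : Int) (y : Int) (h_ : Int) (w : Int) (out : Int) : Prop := out = count_surrounding_rolls_alt data x y h_ w
instance (data : List (List Int)) (x : Int) (y : Int) (h_ : Int) (w : Int) (out : Int) : Decidable (Spec_count_surrounding_rolls data x y h_ w out) := by unfold Spec_count_surrounding_rolls; infer_instance

-- ===== CLAIM (what is proved, stated in full; the proofs are below) =====
def Claim_equal_count_surrounding_rolls : Prop := ∀ (data : List (List Int)) (x : Int) (y : Int) (h_ : Int) (w : Int), Dom_count_surrounding_rolls data x y h_ w → Pre_count_surrounding_rolls data x y h_ w → Spec_count_surrounding_rolls data x y h_ w (count_surrounding_rolls data x y h_ w)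

-- ===== LEMMAS AND PROOFS =====

-- the value of one candidate neighbour cell, with A's exact guard
def pvCell (data : List (List Int)) (x : Int) (y : Int) (h_ : Int) (w : Int) (ny nx : Int) : Int :=
  if 0 ≤ nx ∧ nx < w ∧ 0 ≤ ny ∧ ny < h_ then
    (if (PySem.List.pyGet? ((PySem.List.pyGet? data ny).getD []) nx).getD 0 ≠ 0 then 1 else 0)
  else 0

-- one column's contribution inside a row already known to be in range
def pvCol (row : List Int) (w nx : Int) : Int :=
  if 0 ≤ nx ∧ nx < w then
    (if (PySem.List.pyGet? row nx).getD 0 ≠ 0 then 1 else 0)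
  else 0

theorem pv_foldl_if_count {α : Type} (l : List α) (c : Int) (p q r : α → Prop)
    [DecidablePred p] [DecidablePred q] [DecidablePred r] :
    List.foldl (fun cnt e => if p e then cnt else if q e then (if r e then cnt + 1 else cnt) else cnt) c l
    = c + (l.map (fun e => if p e then 0 else if q e then (if r e then (1 : Int) else 0) else 0)).sum := by
  induction l generalizing c with
  | nil => simp
  | cons a l ih => simp only [List.foldl_cons, ih, List.map_cons, List.sum_cons]; split_ifs <;> ring

theorem pv_getD_of_nonneg {α : Type} (xs : List α) (i : Int) (d : α) (h : 0 ≤ i) :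
    (PySem.List.pyGet? xs i).getD d = xs.getD i.toNat d := by
  rw [PySem.List.pyGet?_of_nonneg xs h, List.getD_eq_getElem?_getD]

theorem pv_clampRange (t L : Int) :
    PySem.List.pyRange (max 0 (t - 1)) (min L (t + 2)) 1
    = ([t - 1, t, t + 1]).filter (fun n => decide (0 ≤ n ∧ n < L)) := by
  have hpw : ([t - 1, t, t + 1]).Pairwise (· < ·) := by
    simp [List.pairwise_cons]
  refine List.Perm.eq_of_pairwise (fun a b _ _ hab hba => by omega)
    (PySem.List.pairwise_lt_pyRange_one _ _)
    (List.Pairwise.sublist List.filter_sublist hpw) ?_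
  refine (List.perm_ext_iff_of_nodup (PySem.List.nodup_pyRange_one _ _)
    (List.Sublist.nodup List.filter_sublist hpw.nodup)).2 ?_
  intro a
  simp only [PySem.List.mem_pyRange_one, List.mem_filter, List.mem_cons, List.not_mem_nil,
    or_false, decide_eq_true_eq]
  omega

theorem pv_slice_map (row : List Int) (lo hi : Int) (hlo : 0 ≤ lo)
    (hidx : ∀ i : Int, lo ≤ i → i < hi → i.toNat < row.length) :
    PySem.List.slice row (some lo) (some (max 0 hi))
    = (PySem.List.pyRange lo hi 1).map (fun i => (PySem.List.pyGet? row i).getD 0) := by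
  by_cases h : hi ≤ lo
  · rw [PySem.List.pyRange_one_eq_nil h, List.map_nil,
      PySem.List.slice_toNat row hlo (le_max_left 0 hi)]
    have h0 : (max 0 hi).toNat - lo.toNat = 0 := by omega
    simp [h0]
  · push_neg at h
    have hhi : hi ≤ row.length := by
      have := hidx (hi - 1) (by omega) (by omega); omega
    rw [PySem.List.slice_toNat row hlo (by omega)]
    have hmax : (max 0 hi) = hi := by omega
    rw [hmax]
    apply List.ext_getElem
    · simp [PySem.List.length_pyRange_one]; omega
    · intro k hk1 hk2
      have hk : k < (hi - lo).toNat := by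
        simpa [PySem.List.length_pyRange_one] using hk2
      have hlt : lo.toNat + k < row.length := by omega
      simp only [List.getElem_map, PySem.List.getElem_pyRange_one]
      rw [PySem.List.pyGet?_of_nonneg row (show (0:Int) ≤ lo + k by omega)]
      have h2 : (lo + (k : Int)).toNat = lo.toNat + k := by omega
      simp [h2, hlt]

theorem pv_countP_sum {α : Type} (p : α → Bool) (l : List α) :
    ((l.countP p : Nat) : Int) = (l.map (fun v => if p v = true then (1 : Int) else 0)).sum := by
  induction l with
  | nil => simp
  | cons a l ih =>
    by_cases h : p a = true <;> simp [List.countP_cons, h, ih] <;> ring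

theorem pv_filter_map_sum (l : List Int) (p : Int → Bool) (f : Int → Int) :
    ((l.filter p).map f).sum = (l.map (fun a => if p a = true then f a else 0)).sum := by
  induction l with
  | nil => simp
  | cons a l ih =>
    by_cases h : p a = true <;> simp [List.filter_cons, h, ih]

theorem pv_rowEq (row : List Int) (x w : Int)
    (hcol : ∀ nx ∈ [x - 1, x, x + 1], 0 ≤ nx → nx < w → nx.toNat < row.length) :
    ((PySem.List.slice row (some (max 0 (x - 1))) (some (max 0 (min w (x + 2))))).countP
        (fun v => v ≠ 0) : Int)
    = pvCol row w (x - 1) + pvCol row w x + pvCol row w (x + 1) := by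
  rw [pv_slice_map row (max 0 (x - 1)) (min w (x + 2)) (le_max_left _ _) ?hidx]
  case hidx =>
    intro i h1 h2
    exact hcol i (by simp; omega) (by omega) (by omega)
  rw [pv_clampRange x w, pv_countP_sum, List.map_map, pv_filter_map_sum]
  simp [pvCol, Function.comp]
  ring

-- A as the sum of its eight guarded neighbour cells
theorem pv_A_norm (data : List (List Int)) (x y h_ w : Int) :
    count_surrounding_rolls data x y h_ w
    = pvCell data x y h_ w (y-1) (x-1) + pvCell data x y h_ w (y-1) x + pvCell data x y h_ w (y-1) (x+1)
    + pvCell data x y h_ w y (x-1) + pvCell data x y h_ w y (x+1)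
    + pvCell data x y h_ w (y+1) (x-1) + pvCell data x y h_ w (y+1) x + pvCell data x y h_ w (y+1) (x+1) := by
  unfold count_surrounding_rolls
  simp only [pv_foldl_if_count, PySem.List.foldl_add]
  simp [pvCell, show x + (-1) = x - 1 from by ring, show y + (-1) = y - 1 from by ring]
  ring

-- one row's contribution, with the row guard made explicit
theorem pv_rowTerm (data : List (List Int)) (x y h_ w : Int) (ny : Int)
    (hny : ny ∈ [y - 1, y, y + 1]) (pre : Pre_count_surrounding_rolls data x y h_ w) :
    (if 0 ≤ ny ∧ ny < h_ then
        ((PySem.List.slice ((PySem.List.pyGet? data ny).getD [])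
            (some (max 0 (x - 1))) (some (max 0 (min w (x + 2))))).countP (fun v => v ≠ 0) : Int)
      else 0)
    = pvCell data x y h_ w ny (x - 1) + pvCell data x y h_ w ny x + pvCell data x y h_ w ny (x + 1) := by
  by_cases hr : 0 ≤ ny ∧ ny < h_
  · rw [if_pos hr]
    have hrow := pre ny hny hr.1 hr.2
    have hget : (PySem.List.pyGet? data ny).getD [] = data.getD ny.toNat [] :=
      pv_getD_of_nonneg data ny [] hr.1
    rw [pv_rowEq _ x w (by rw [hget]; exact hrow.2)]
    have hcc : ∀ nx : Int, pvCol ((PySem.List.pyGet? data ny).getD []) w nx = pvCell data x y h_ w ny nx := by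
      intro nx
      unfold pvCol pvCell
      by_cases hc : 0 ≤ nx ∧ nx < w
      · rw [if_pos (show 0 ≤ nx ∧ nx < w ∧ 0 ≤ ny ∧ ny < h_ from ⟨hc.1, hc.2, hr.1, hr.2⟩),
          if_pos hc]
      · rw [if_neg hc,
          if_neg (show ¬(0 ≤ nx ∧ nx < w ∧ 0 ≤ ny ∧ ny < h_) from by tauto)]
    rw [hcc, hcc, hcc]
  · rw [if_neg hr]
    unfold pvCell
    have e : ∀ nx : Int,
        (if 0 ≤ nx ∧ nx < w ∧ 0 ≤ ny ∧ ny < h_ then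
          (if (PySem.List.pyGet? ((PySem.List.pyGet? data ny).getD []) nx).getD 0 ≠ 0 then (1 : Int) else 0)
        else 0) = 0 := fun nx => if_neg (by tauto)
    rw [e, e, e]
    ring

-- ===== VERDICT (by name: the statement is the Claim_ definition above) =====
theorem count_surrounding_rolls_spec : Claim_equal_count_surrounding_rolls := by
  intro data x y h_ w _hdom pre
  unfold Spec_count_surrounding_rolls
  unfold count_surrounding_rolls_alt
  simp only [PySem.List.foldl_add, pv_clampRange y h_, pv_filter_map_sum,
    decide_eq_true_eq, List.map_cons, List.map_nil, List.sum_cons, List.sum_nil]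
  rw [pv_rowTerm data x y h_ w (y - 1) (by simp) pre,
      pv_rowTerm data x y h_ w y (by simp) pre,
      pv_rowTerm data x y h_ w (y + 1) (by simp) pre,
      pv_A_norm]
  by_cases hc : 0 ≤ y ∧ y < h_ ∧ 0 ≤ x ∧ x < w ∧
      (PySem.List.pyGet? ((PySem.List.pyGet? data y).getD []) x).getD 0 ≠ 0
  · rw [if_pos hc]
    have hcen : pvCell data x y h_ w y x = 1 := by
      unfold pvCell
      rw [if_pos ⟨hc.2.2.1, hc.2.2.2.1, hc.1, hc.2.1⟩, if_pos hc.2.2.2.2]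
    rw [hcen]
    ring
  · rw [if_neg hc]
    have hcen : pvCell data x y h_ w y x = 0 := by
      unfold pvCell
      by_cases hb : 0 ≤ x ∧ x < w ∧ 0 ≤ y ∧ y < h_
      · rw [if_pos hb,
          if_neg (show ¬((PySem.List.pyGet? ((PySem.List.pyGet? data y).getD []) x).getD 0 ≠ 0) from by tauto)]
      · rw [if_neg hb]
    rw [hcen]
    ring
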